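-- pv_equiv track=rewrite | github.com/thearikdan/MyExperimentalProjects | pyfin/utils/stats/drop_stats.py | get_drop_list
-- ===== SOURCE A (Python) =====
-- def get_last_drop_index(price_list, ind):
--     count = len(price_list)
--     for i in range (ind, count - 1):
--         if price_list[i + 1] < price_list[i]:
--             continue
--         else:
--             return (i)
--
-- def get_first_drop_index(price_list, ind):
--     count = len(price_list)
--     for i in range (ind, count - 1):
--         if price_list[i + 1] < price_list[i]:
--             return i
--     return -1
--
-- def get_next_drop(price_list, ind):
--     count = len(price_list)
--     if ind == count - 1:
--         return ()
--     for i in range (ind, count - 1):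
--         k = get_first_drop_index(price_list, i)
--         if k == -1:
--             return ()
--         l = get_last_drop_index(price_list, k + 1)
--         return (k, l)
--
-- def get_drop_list(price_list):
--     drop_list = []
--     count = len(price_list)
--     i = 0
--     while i < count:
--         drop = get_next_drop(price_list, i)
--         if None in drop:
--             break
--         if len(drop) > 0:
--             drop_list.append(drop)
--             i = drop[1]
--         else:
--             i = i + 1
--     return drop_list
-- ===== SOURCE B (Python) =====
-- def get_drop_list(price_list):
--     n = len(price_list)
--     result = []
--     start = None
--     for i in range(n - 1):
--         if price_list[i + 1] < price_list[i]:
--             if start is None: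
--                 start = i
--         else:
--             if start is not None:
--                 result.append((start, i))
--                 start = None
--     return result
-- ===== Notes on version B (the rewrite author's own statement) =====
-- stated objective: faster
-- what changed: Replaces A's while-loop that repeatedly rescans with get_first_drop_index/get_last_drop_index (restarting a linear search at each position) by a single left-to-right pass that tracks the start of the current decreasing run and emits (start, end) when the run closes, naturally never emitting a run that reaches the end of the list (A's None/break case).
import Mathlib
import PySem

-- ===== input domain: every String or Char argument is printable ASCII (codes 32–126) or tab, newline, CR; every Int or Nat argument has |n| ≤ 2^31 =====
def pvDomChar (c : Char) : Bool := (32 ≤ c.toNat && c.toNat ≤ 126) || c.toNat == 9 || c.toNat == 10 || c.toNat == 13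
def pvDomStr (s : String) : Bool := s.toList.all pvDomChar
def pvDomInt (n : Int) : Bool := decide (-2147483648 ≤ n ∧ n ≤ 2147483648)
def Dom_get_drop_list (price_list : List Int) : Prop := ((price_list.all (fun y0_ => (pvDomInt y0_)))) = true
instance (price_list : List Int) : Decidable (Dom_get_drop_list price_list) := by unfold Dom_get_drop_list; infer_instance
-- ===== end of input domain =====

-- B replaces A's quadratic restart-and-rescan search with a single left-to-right pass
-- that tracks the current decreasing run (objective: faster, asymptotic O(n) vs O(n^2)).

-- shared tiny helper: the comparison price_list[i+1] < price_list[i]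
-- (indices used by both programs are always in range, so .getD 0 is exact there)
def dropCond (pl : List Int) (i : Int) : Bool :=
  decide (((PySem.List.pyGet? pl (i + 1)).getD 0) < ((PySem.List.pyGet? pl i).getD 0))

-- ===== PORT A =====
-- for i in range(ind, count-1): if drop: continue else return i   (fall through = None)
def lastDropGo (pl : List Int) : List Int → Option Int
  | [] => none
  | i :: rest => if dropCond pl i then lastDropGo pl rest else some i

def get_last_drop_index (pl : List Int) (ind : Int) : Option Int :=
  lastDropGo pl (PySem.List.pyRange ind ((pl.length : Int) - 1) 1)

-- for i in range(ind, count-1): if drop: return i   ; return -1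
def firstDropGo (pl : List Int) : List Int → Int
  | [] => -1
  | i :: rest => if dropCond pl i then i else firstDropGo pl rest

def get_first_drop_index (pl : List Int) (ind : Int) : Int :=
  firstDropGo pl (PySem.List.pyRange ind ((pl.length : Int) - 1) 1)

-- Python returns () (encoded none) or a pair (k, l) where l may itself be None;
-- the for-loop always returns on its first iteration, so only the head of the range matters.
def get_next_drop (pl : List Int) (ind : Int) : Option (Int × Option Int) :=
  if ind = (pl.length : Int) - 1 then none
  else
    match PySem.List.pyRange ind ((pl.length : Int) - 1) 1 with
    | [] => none
    | i :: _ =>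
      let k := get_first_drop_index pl i
      if k = -1 then none
      else some (k, get_last_drop_index pl (k + 1))

-- while i < count, fueled; each iteration moves i strictly right, so fuel = len suffices
def dropLoop (pl : List Int) : Nat → Int → List (Int × Int) → List (Int × Int)
  | 0, _, acc => acc
  | fuel + 1, i, acc =>
    if i < (pl.length : Int) then
      match get_next_drop pl i with
      | none => dropLoop pl fuel (i + 1) acc                      -- empty drop: i += 1
      | some (_, none) => acc                                      -- None in drop: break
      | some (k, some l) => dropLoop pl fuel l (acc ++ [(k, l)])   -- append, i = drop[1]
    else acc

def get_drop_list (price_list : List Int) : List (Int × Int) :=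
  dropLoop price_list price_list.length 0 []

-- ===== PORT B =====
-- single pass: start marks the beginning of the current decreasing run, if any
def altLoop (pl : List Int) : List Int → Option Int → List (Int × Int) → List (Int × Int)
  | [], _, res => res
  | i :: rest, start, res =>
    if dropCond pl i then
      altLoop pl rest (if start.isNone then some i else start) res
    else
      match start with
      | none => altLoop pl rest none res
      | some s => altLoop pl rest none (res ++ [(s, i)])

def get_drop_list_alt (price_list : List Int) : List (Int × Int) :=
  altLoop price_list (PySem.List.pyRange 0 ((price_list.length : Int) - 1) 1) none []

-- ===== PRECONDITION & SPEC =====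
def Spec_get_drop_list (price_list : List Int) (out : List (Int × Int)) : Prop := out = get_drop_list_alt price_list
instance (price_list : List Int) (out : List (Int × Int)) : Decidable (Spec_get_drop_list price_list out) := by unfold Spec_get_drop_list; infer_instance

-- ===== CLAIM (what is proved, stated in full; the proofs are below) =====
def Claim_equal_get_drop_list : Prop := ∀ (price_list : List Int), Dom_get_drop_list price_list → Spec_get_drop_list price_list (get_drop_list price_list)

-- ===== LEMMAS AND PROOFS =====

theorem pyRange_nil {a b : Int} (h : b ≤ a) : PySem.List.pyRange a b 1 = [] := by
  rw [PySem.List.pyRange_one]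
  have : (b - a).toNat = 0 := by omega
  simp [this]

-- facts about the scanning helpers

theorem firstDropGo_mem (pl : List Int) (xs : List Int) :
    firstDropGo pl xs = -1 ∨ (firstDropGo pl xs ∈ xs ∧ dropCond pl (firstDropGo pl xs) = true) := by
  induction xs with
  | nil => left; rfl
  | cons i rest ih =>
    by_cases h : dropCond pl i
    · right; simp [firstDropGo, h]
    · rcases ih with h1 | ⟨h1, h2⟩
      · left; simp [firstDropGo, h, h1]
      · right; simp [firstDropGo, h, h1, h2]

theorem lastDropGo_mem (pl : List Int) (xs : List Int) (l : Int)
    (h : lastDropGo pl xs = some l) : l ∈ xs ∧ dropCond pl l = false := by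
  induction xs with
  | nil => simp [lastDropGo] at h
  | cons i rest ih =>
    by_cases hc : dropCond pl i
    · simp [lastDropGo, hc] at h
      rcases ih h with ⟨h1, h2⟩
      exact ⟨List.mem_cons_of_mem _ h1, h2⟩
    · simp [lastDropGo, hc] at h
      subst h
      exact ⟨List.mem_cons_self, by simpa using hc⟩

theorem first_facts (pl : List Int) (i : Int)
    (h : get_first_drop_index pl i ≠ -1) :
    i ≤ get_first_drop_index pl i ∧ get_first_drop_index pl i < (pl.length : Int) - 1 ∧
      dropCond pl (get_first_drop_index pl i) = true := by
  rcases firstDropGo_mem pl (PySem.List.pyRange i ((pl.length : Int) - 1) 1) with h1 | ⟨h1, h2⟩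
  · exact absurd h1 h
  · rcases PySem.List.mem_pyRange_one.1 h1 with ⟨ha, hb⟩
    exact ⟨ha, hb, h2⟩

theorem last_facts (pl : List Int) (j l : Int)
    (h : get_last_drop_index pl j = some l) :
    j ≤ l ∧ l < (pl.length : Int) - 1 ∧ dropCond pl l = false := by
  rcases lastDropGo_mem pl _ l h with ⟨h1, h2⟩
  rcases PySem.List.mem_pyRange_one.1 h1 with ⟨ha, hb⟩
  exact ⟨ha, hb, h2⟩

-- single-step unfoldings of A's scanners

theorem first_stop (pl : List Int) (i : Int) (h : i < (pl.length : Int) - 1)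
    (hc : dropCond pl i = true) : get_first_drop_index pl i = i := by
  unfold get_first_drop_index
  rw [PySem.List.pyRange_one_cons h]
  simp [firstDropGo, hc]

theorem first_skip (pl : List Int) (i : Int) (h : i < (pl.length : Int) - 1)
    (hc : dropCond pl i = false) :
    get_first_drop_index pl i = get_first_drop_index pl (i + 1) := by
  unfold get_first_drop_index
  rw [PySem.List.pyRange_one_cons h]
  simp [firstDropGo, hc]

theorem last_stop (pl : List Int) (i : Int) (h : i < (pl.length : Int) - 1)
    (hc : dropCond pl i = false) : get_last_drop_index pl i = some i := by
  unfold get_last_drop_index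
  rw [PySem.List.pyRange_one_cons h]
  simp [lastDropGo, hc]

theorem last_skip (pl : List Int) (i : Int) (h : i < (pl.length : Int) - 1)
    (hc : dropCond pl i = true) :
    get_last_drop_index pl i = get_last_drop_index pl (i + 1) := by
  unfold get_last_drop_index
  rw [PySem.List.pyRange_one_cons h]
  simp [lastDropGo, hc]

-- B-side: the fold from index i onward, with no open run
def Bfold (pl : List Int) (i : Int) : List (Int × Int) :=
  altLoop pl (PySem.List.pyRange i ((pl.length : Int) - 1) 1) none []

theorem altLoop_acc (pl : List Int) (xs : List Int) :
    ∀ start res, altLoop pl xs start res = res ++ altLoop pl xs start [] := by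
  induction xs with
  | nil => intro start res; simp [altLoop]
  | cons i rest ih =>
    intro start res
    by_cases hc : dropCond pl i
    · simp only [altLoop, hc, if_true]
      rw [ih, ih (if start.isNone then some i else start) []]
    · cases start with
      | none =>
        simp only [altLoop, hc, Bool.false_eq_true, if_false]
        exact ih none res
      | some s =>
        simp only [altLoop, hc, Bool.false_eq_true, if_false]
        rw [ih none (res ++ [(s, i)]), ih none ([] ++ [(s, i)])]
        simp

theorem Bfold_nil (pl : List Int) (i : Int) (h : (pl.length : Int) - 1 ≤ i) :
    Bfold pl i = [] := by
  unfold Bfold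
  rw [pyRange_nil h]
  rfl

theorem Bfold_empty_of_first_neg (pl : List Int) :
    ∀ (m : Nat) (i : Int), ((pl.length : Int) - 1 - i).toNat ≤ m → 0 ≤ i →
      get_first_drop_index pl i = -1 → Bfold pl i = [] := by
  intro m
  induction m with
  | zero =>
    intro i hm _ _
    exact Bfold_nil pl i (by omega)
  | succ m ih =>
    intro i hm h0 hf
    by_cases hi : i < (pl.length : Int) - 1
    · have hc : dropCond pl i = false := by
        by_contra hc
        have hc' : dropCond pl i = true := by simpa using hc
        have := first_stop pl i hi hc'
        omega
      have hnext : get_first_drop_index pl (i + 1) = -1 := by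
        rw [← first_skip pl i hi hc]; exact hf
      unfold Bfold
      rw [PySem.List.pyRange_one_cons hi]
      simp only [altLoop, hc, Bool.false_eq_true, if_false]
      exact ih (i + 1) (by omega) (by omega) hnext
    · exact Bfold_nil pl i (by omega)

theorem alt_run_none (pl : List Int) :
    ∀ (m : Nat) (i : Int), ((pl.length : Int) - 1 - i).toNat ≤ m →
      get_last_drop_index pl i = none →
      ∀ s, altLoop pl (PySem.List.pyRange i ((pl.length : Int) - 1) 1) (some s) [] = [] := by
  intro m
  induction m with
  | zero =>
    intro i hm _ s
    rw [pyRange_nil (by omega)]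
    rfl
  | succ m ih =>
    intro i hm hl s
    by_cases hi : i < (pl.length : Int) - 1
    · have hc : dropCond pl i = true := by
        by_contra hc
        have hc' : dropCond pl i = false := by simpa using hc
        rw [last_stop pl i hi hc'] at hl
        simp at hl
      rw [last_skip pl i hi hc] at hl
      rw [PySem.List.pyRange_one_cons hi]
      simp only [altLoop, hc, if_true, Option.isNone_some, Bool.false_eq_true]
      exact ih (i + 1) (by omega) hl s
    · rw [pyRange_nil (by omega)]
      rfl

theorem alt_run_some (pl : List Int) :
    ∀ (m : Nat) (i : Int), ((pl.length : Int) - 1 - i).toNat ≤ m →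
      ∀ l, get_last_drop_index pl i = some l →
      ∀ s, altLoop pl (PySem.List.pyRange i ((pl.length : Int) - 1) 1) (some s) [] =
        (s, l) :: Bfold pl (l + 1) := by
  intro m
  induction m with
  | zero =>
    intro i hm l hl s
    have : get_last_drop_index pl i = none := by
      unfold get_last_drop_index
      rw [pyRange_nil (by omega)]
      rfl
    rw [this] at hl
    simp at hl
  | succ m ih =>
    intro i hm l hl s
    by_cases hi : i < (pl.length : Int) - 1
    · by_cases hc : dropCond pl i
      · rw [last_skip pl i hi hc] at hl
        rw [PySem.List.pyRange_one_cons hi]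
        simp only [altLoop, hc, if_true, Option.isNone_some, Bool.false_eq_true]
        exact ih (i + 1) (by omega) l hl s
      · have hc' : dropCond pl i = false := by simpa using hc
        rw [last_stop pl i hi hc'] at hl
        cases hl
        rw [PySem.List.pyRange_one_cons hi]
        simp only [altLoop, hc', Bool.false_eq_true, if_false]
        rw [altLoop_acc]
        rfl
    · have : get_last_drop_index pl i = none := by
        unfold get_last_drop_index
        rw [pyRange_nil (by omega)]
        rfl
      rw [this] at hl
      simp at hl

theorem Bfold_skip_to_first (pl : List Int) :
    ∀ (m : Nat) (i : Int), ((pl.length : Int) - 1 - i).toNat ≤ m →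
      get_first_drop_index pl i ≠ -1 →
      Bfold pl i = Bfold pl (get_first_drop_index pl i) := by
  intro m
  induction m with
  | zero =>
    intro i hm hf
    exfalso
    apply hf
    unfold get_first_drop_index
    rw [pyRange_nil (by omega)]
    rfl
  | succ m ih =>
    intro i hm hf
    by_cases hi : i < (pl.length : Int) - 1
    · by_cases hc : dropCond pl i
      · rw [first_stop pl i hi hc]
      · have hc' : dropCond pl i = false := by simpa using hc
        rw [first_skip pl i hi hc'] at hf ⊢
        have hstep : Bfold pl i = Bfold pl (i + 1) := by
          unfold Bfold
          rw [PySem.List.pyRange_one_cons hi]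
          simp only [altLoop, hc', Bool.false_eq_true, if_false]
        rw [hstep]
        exact ih (i + 1) (by omega) hf
    · exfalso
      apply hf
      unfold get_first_drop_index
      rw [pyRange_nil (by omega)]
      rfl

-- the heart: Bfold at a position where A found a full drop (k, l)
theorem Bfold_step (pl : List Int) (i k l : Int)
    (hf : get_first_drop_index pl i = k) (hk : k ≠ -1)
    (hl : get_last_drop_index pl (k + 1) = some l) :
    Bfold pl i = (k, l) :: Bfold pl l := by
  rcases first_facts pl i (hf ▸ hk) with ⟨h1, h2, h3⟩
  rw [hf] at h1 h2 h3
  rcases last_facts pl (k + 1) l hl with ⟨h4, h5, h6⟩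
  have e1 : Bfold pl i = Bfold pl k := by
    rw [Bfold_skip_to_first pl ((pl.length : Int) - 1 - i).toNat i le_rfl (hf ▸ hk), hf]
  have e2 : Bfold pl k = (k, l) :: Bfold pl (l + 1) := by
    unfold Bfold
    rw [PySem.List.pyRange_one_cons h2]
    simp only [altLoop, h3, if_true, Option.isNone_none, if_true]
    exact alt_run_some pl ((pl.length : Int) - 1 - (k + 1)).toNat (k + 1) le_rfl l hl k
  have e3 : Bfold pl l = Bfold pl (l + 1) := by
    unfold Bfold
    rw [PySem.List.pyRange_one_cons h5]
    simp only [altLoop, h6, Bool.false_eq_true, if_false]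
  rw [e1, e2, ← e3]

-- main invariant: A's while-loop from i equals acc ++ (B's fold from i)
theorem dropLoop_eq_Bfold (pl : List Int) :
    ∀ (fuel : Nat) (i : Int) (acc : List (Int × Int)), 0 ≤ i →
      (pl.length : Int) - i ≤ (fuel : Int) →
      dropLoop pl fuel i acc = acc ++ Bfold pl i := by
  intro fuel
  induction fuel with
  | zero =>
    intro i acc h0 hfuel
    rw [Bfold_nil pl i (by push_cast at hfuel ⊢; omega)]
    simp [dropLoop]
  | succ fuel ih =>
    intro i acc h0 hfuel
    by_cases hin : i < (pl.length : Int)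
    · by_cases hend : i = (pl.length : Int) - 1
      · have : get_next_drop pl i = none := by simp [get_next_drop, hend]
        simp only [dropLoop, hin, if_true, this]
        rw [ih (i + 1) acc (by omega) (by push_cast at hfuel ⊢; omega)]
        rw [Bfold_nil pl i (by omega), Bfold_nil pl (i + 1) (by omega)]
      · have hi : i < (pl.length : Int) - 1 := by omega
        by_cases hk : get_first_drop_index pl i = -1
        · have : get_next_drop pl i = none := by
            simp only [get_next_drop, hend, if_false]
            rw [PySem.List.pyRange_one_cons hi]
            simp [hk]
          simp only [dropLoop, hin, if_true, this]
          rw [ih (i + 1) acc (by omega) (by push_cast at hfuel ⊢; omega)]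
          have hc : dropCond pl i = false := by
            by_contra hc
            have hc' : dropCond pl i = true := by simpa using hc
            have := first_stop pl i hi hc'
            omega
          have hnext : get_first_drop_index pl (i + 1) = -1 := by
            rw [← first_skip pl i hi hc]; exact hk
          rw [Bfold_empty_of_first_neg pl ((pl.length : Int) - 1 - i).toNat i le_rfl h0 hk,
            Bfold_empty_of_first_neg pl ((pl.length : Int) - 1 - (i + 1)).toNat (i + 1) le_rfl (by omega) hnext]
        · rcases first_facts pl i hk with ⟨h1, h2, h3⟩
          cases hlast : get_last_drop_index pl (get_first_drop_index pl i + 1) with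
          | none =>
            have : get_next_drop pl i = some (get_first_drop_index pl i, none) := by
              simp only [get_next_drop, hend, if_false]
              rw [PySem.List.pyRange_one_cons hi]
              simp [hk, hlast]
            simp only [dropLoop, hin, if_true, this]
            have e1 : Bfold pl i = Bfold pl (get_first_drop_index pl i) :=
              Bfold_skip_to_first pl ((pl.length : Int) - 1 - i).toNat i le_rfl hk
            have e2 : Bfold pl (get_first_drop_index pl i) = [] := by
              unfold Bfold
              rw [PySem.List.pyRange_one_cons h2]
              simp only [altLoop, h3, if_true, Option.isNone_none, if_true]
              exact alt_run_none pl ((pl.length : Int) - 1 - (get_first_drop_index pl i + 1)).toNat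
                (get_first_drop_index pl i + 1) le_rfl hlast _
            rw [e1, e2]
            simp
          | some l =>
            rcases last_facts pl (get_first_drop_index pl i + 1) l hlast with ⟨h4, h5, h6⟩
            have : get_next_drop pl i = some (get_first_drop_index pl i, some l) := by
              simp only [get_next_drop, hend, if_false]
              rw [PySem.List.pyRange_one_cons hi]
              simp [hk, hlast]
            simp only [dropLoop, hin, if_true, this]
            rw [ih l (acc ++ [(get_first_drop_index pl i, l)]) (by omega)
              (by push_cast at hfuel ⊢; omega)]
            rw [Bfold_step pl i (get_first_drop_index pl i) l rfl hk hlast]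
            simp
    · rw [Bfold_nil pl i (by omega)]
      simp [dropLoop, hin]

-- ===== VERDICT (by name: the statement is the Claim_ definition above) =====
theorem get_drop_list_spec : Claim_equal_get_drop_list := by
  intro pl _
  unfold Spec_get_drop_list get_drop_list get_drop_list_alt
  rw [dropLoop_eq_Bfold pl pl.length 0 [] le_rfl (by omega)]
  rfl
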